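-- pv_equiv track=rewrite | github.com/wBlackPrince/Problem-Solutions | 5/249.py | f
-- ===== SOURCE A (Python) =====
-- def f(n):
--    bini = bin(n)[2:]
--    for i in range(3):
--       if bini.count("0") == bini.count("1"):
--          bini += bini[-1]
--       else:
--          if bini.count("0") > bini.count("1"):
--             bini += "1"
--          else:
--             bini += "0"
--    return int(bini,2)
-- ===== SOURCE B (Python) =====
-- # The three appended bits depend only on d = (#zeros - #ones) clipped to [-3, 3]
-- # and the last bit of n; this precomputed table replaces the whole loop.
-- _SUFFIX = {
--     (-3, 0): 0, (-3, 1): 0, (-2, 0): 0, (-2, 1): 0,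
--     (-1, 0): 1, (-1, 1): 1, (0, 0): 3, (0, 1): 4,
--     (1, 0): 6, (1, 1): 6, (2, 0): 7, (2, 1): 7,
--     (3, 0): 7, (3, 1): 7,
-- }
--
-- def f(n):
--     if n == 0:
--         d, last = 1, 0
--     else:
--         d = 0
--         m = n
--         while m:
--             d += -1 if m % 2 else 1
--             m //= 2
--         last = n % 2
--     return n * 8 + _SUFFIX[(max(-3, min(3, d)), last)]
-- ===== Notes on version B (the rewrite author's own statement) =====
-- stated objective: alternative
-- what changed: B eliminates A's iterative string-append loop entirely: it tallies zeros-minus-ones and the last bit of n once, clips the difference into a small fixed range, looks the appended-bits suffix up in a precomputed table, and returns n shifted left plus that suffix (no string building, no per-iteration counting, no re-parse).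
import Mathlib
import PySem

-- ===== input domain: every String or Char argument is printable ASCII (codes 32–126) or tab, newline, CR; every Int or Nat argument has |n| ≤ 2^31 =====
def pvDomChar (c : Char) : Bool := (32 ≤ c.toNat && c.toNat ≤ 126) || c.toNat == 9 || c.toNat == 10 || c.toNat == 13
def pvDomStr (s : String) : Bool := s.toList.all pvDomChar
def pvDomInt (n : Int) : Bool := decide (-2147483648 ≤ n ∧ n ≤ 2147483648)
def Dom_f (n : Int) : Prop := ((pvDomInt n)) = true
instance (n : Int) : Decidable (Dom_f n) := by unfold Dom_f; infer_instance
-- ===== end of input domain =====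

-- B replaces A's iterative string-append loop by a precomputed table lookup:
-- the appended suffix depends only on zeros-minus-ones, clipped to a small fixed
-- range, and the last bit (objective: alternative).

-- ===== PORT A =====
-- bin(n)[2:] as a list of chars, exact for n ≥ 0 (Pre_f); for n < 0 Python A raises ValueError later.
def binAux : Nat → List Char
  | 0 => []
  | (m+1) => binAux ((m+1) / 2) ++ [if (m+1) % 2 = 1 then '1' else '0']
decreasing_by exact Nat.div_lt_self (Nat.succ_pos m) (by omega)

def binStr (n : Int) : List Char := if n = 0 then ['0'] else binAux n.toNat

-- int(s, 2), ported by hand digit by digit (exact on strings of '0'/'1' digits, which is all A feeds it under Pre_f)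
def toInt2 (s : List Char) : Int := s.foldl (fun a c => 2 * a + (if c = '1' then 1 else 0)) 0

-- one iteration of A's for-loop body
def stepA (s : List Char) : List Char :=
  if s.count '0' = s.count '1' then
    s ++ [(PySem.List.pyGet? s (-1)).getD '0']   -- bini[-1]; s is never empty under Pre_f
  else if s.count '0' > s.count '1' then s ++ ['1']
  else s ++ ['0']

def f (n : Int) : Int :=
  toInt2 ((List.range 3).foldl (fun s _ => stepA s) (binStr n))

-- ===== PORT B =====
-- Source B's _SUFFIX dict, literal
def suffixTable : PySem.Dict (Int × Int) Int :=
  PySem.Dict.ofList [((-3, 0), 0), ((-3, 1), 0), ((-2, 0), 0), ((-2, 1), 0),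
    ((-1, 0), 1), ((-1, 1), 1), ((0, 0), 3), ((0, 1), 4),
    ((1, 0), 6), ((1, 1), 6), ((2, 0), 7), ((2, 1), 7),
    ((3, 0), 7), ((3, 1), 7)]

-- Source B's while loop accumulating d = (#zero bits) - (#one bits) of m
def tallyD (m : Nat) (d : Int) : Int :=
  if h : m = 0 then d
  else tallyD (m / 2) (d + (if m % 2 = 1 then -1 else 1))
decreasing_by exact Nat.div_lt_self (Nat.pos_of_ne_zero h) (by omega)

-- _SUFFIX[(max(-3, min(3, d)), last)]; .getD 0 stands for the KeyError branch, never hit: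
-- every key with first component in [-3,3] and second in {0,1} is present
def sufLookup (d last : Int) : Int :=
  (PySem.Dict.get? suffixTable (max (-3) (min 3 d), last)).getD 0

def f_alt (n : Int) : Int :=
  let dl : Int × Int := if n = 0 then (1, 0) else (tallyD n.toNat 0, PySem.Int.mod n 2)
  n * 8 + sufLookup dl.1 dl.2

-- ===== PRECONDITION & SPEC =====
-- Pre_f: for n < 0 Python A raises ValueError (bin(n)[2:] keeps the 'b' of '-0b…', so int(·,2) fails).
def Pre_f (n : Int) : Prop := 0 ≤ n
instance (n : Int) : Decidable (Pre_f n) := by unfold Pre_f; infer_instance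

def pvWitness_f : Int := 6

def Spec_f (n : Int) (out : Int) : Prop := out = f_alt n
instance (n : Int) (out : Int) : Decidable (Spec_f n out) := by unfold Spec_f; infer_instance

-- ===== CLAIM (what is proved, stated in full; the proofs are below) =====
def Claim_equal_f : Prop := ∀ (n : Int), Dom_f n → Pre_f n → Spec_f n (f n)

-- ===== LEMMAS AND PROOFS =====

-- proof-side abstraction of one iteration of A's loop on the state (d = #0 - #1, last bit, value)
def stepD : Int × Int × Int → Int × Int × Int :=
  fun (d, last, acc) =>
    let bit := if d = 0 then last else if d > 0 then 1 else 0
    (d + (if bit = 0 then 1 else -1), bit, 2 * acc + bit)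

-- the coupling invariant between A's string state and the abstract state (d, last, acc)
def PVRel (s : List Char) (t : Int × Int × Int) : Prop :=
  s ≠ [] ∧ (∀ c ∈ s, c = '0' ∨ c = '1') ∧
  t.1 = (s.count '0' : Int) - (s.count '1' : Int) ∧
  t.2.1 = (if s.getLast? = some '1' then 1 else 0) ∧ t.2.2 = toInt2 s

theorem toInt2_append (s : List Char) (c : Char) :
    toInt2 (s ++ [c]) = 2 * toInt2 s + (if c = '1' then 1 else 0) := by
  simp [toInt2, List.foldl_append]

theorem pyGet_neg_one (s : List Char) (h : s ≠ []) :
    PySem.List.pyGet? s (-1) = s.getLast? := by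
  simp [PySem.List.pyGet?, PySem.List.pyIdx?]
  rw [if_pos (by exact Nat.one_le_iff_ne_zero.mpr (by simpa using h))]
  simp [List.getLast?_eq_getElem?]

theorem step_rel (s : List Char) (t : Int × Int × Int) (h : PVRel s t) :
    PVRel (stepA s) (stepD t) := by
  obtain ⟨d, last, acc⟩ := t
  obtain ⟨hne, hchars, hd, hlast, hacc⟩ := h
  simp only at hd hlast hacc
  have hgl : s.getLast? = some (s.getLast hne) := List.getLast?_eq_some_getLast hne
  have hglmem : s.getLast hne ∈ s := List.getLast_mem hne
  have hgl01 : s.getLast hne = '0' ∨ s.getLast hne = '1' := hchars _ hglmem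
  have hmem : ∀ (c : Char), (c = '0' ∨ c = '1') → ∀ x ∈ s ++ [c], x = '0' ∨ x = '1' := by
    intro c hc x hx
    rcases List.mem_append.mp hx with hm | hm
    · exact hchars _ hm
    · simp at hm; subst hm; exact hc
  by_cases hc : s.count '0' = s.count '1'
  · have hb : d = 0 := by omega
    have hA : stepA s = s ++ [s.getLast hne] := by
      simp [stepA, hc, pyGet_neg_one s hne, hgl]
    rcases hgl01 with h01 | h01
    · have hlast0 : last = 0 := by rw [hlast, hgl, h01]; decide
      refine ⟨by simp [hA], hA ▸ hmem _ (Or.inl h01), ?_, ?_, ?_⟩ <;>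
        simp [stepD, hb, hlast0, hA, List.count_append, h01,
          toInt2_append, hacc] <;> omega
    · have hlast1 : last = 1 := by rw [hlast, hgl, h01]; simp
      refine ⟨by simp [hA], hA ▸ hmem _ (Or.inr h01), ?_, ?_, ?_⟩ <;>
        simp [stepD, hb, hlast1, hA, List.count_append, h01,
          toInt2_append, hacc] <;> omega
  · by_cases hgt : s.count '0' > s.count '1'
    · have hbd0 : ¬ d = 0 := by omega
      have hbd : d > 0 := by omega
      have hA : stepA s = s ++ ['1'] := by simp [stepA, hc, hgt]
      refine ⟨by simp [hA], hA ▸ hmem _ (Or.inr rfl), ?_, ?_, ?_⟩ <;>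
        simp [stepD, hbd0, hbd, hA, List.count_append,
          toInt2_append, hacc] <;> omega
    · have hlt : s.count '0' < s.count '1' := by omega
      have hbd0 : ¬ d = 0 := by omega
      have hbd : ¬ d > 0 := by omega
      have hA : stepA s = s ++ ['0'] := by simp [stepA, hc, hgt]
      refine ⟨by simp [hA], hA ▸ hmem _ (Or.inl rfl), ?_, ?_, ?_⟩ <;>
        simp [stepD, hbd0, hbd, hA, List.count_append,
          toInt2_append, hacc] <;> omega

theorem binAux_chars (m : Nat) : ∀ c ∈ binAux m, c = '0' ∨ c = '1' := by
  induction m using Nat.strong_induction_on with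
  | _ m ih =>
    match m with
    | 0 => simp [binAux]
    | (k+1) =>
      intro c hc
      rw [binAux] at hc
      rcases List.mem_append.mp hc with hm | hm
      · exact ih ((k+1)/2) (Nat.div_lt_self (Nat.succ_pos k) (by omega)) _ hm
      · simp at hm; subst hm; split <;> simp

theorem binAux_ne_nil (m : Nat) (h : m ≠ 0) : binAux m ≠ [] := by
  match m with
  | (k+1) => rw [binAux]; simp

theorem binAux_getLast (m : Nat) (h : m ≠ 0) :
    (binAux m).getLast? = some (if m % 2 = 1 then '1' else '0') := by
  match m with
  | (k+1) => rw [binAux]; simp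

theorem toInt2_binAux (m : Nat) : toInt2 (binAux m) = (m : Int) := by
  induction m using Nat.strong_induction_on with
  | _ m ih =>
    match m with
    | 0 => simp [binAux, toInt2]
    | (k+1) =>
      rw [binAux, toInt2_append, ih ((k+1)/2) (Nat.div_lt_self (Nat.succ_pos k) (by omega))]
      have h2 : (k+1) = 2 * ((k+1)/2) + (k+1) % 2 := by omega
      split <;> rename_i hp
      · push_cast; omega
      · have : (k+1) % 2 = 0 := by omega
        push_cast; omega

theorem tallyD_count (m : Nat) : ∀ d : Int,
    tallyD m d = d + ((binAux m).count '0' : Int) - ((binAux m).count '1' : Int) := by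
  induction m using Nat.strong_induction_on with
  | _ m ih =>
    match m with
    | 0 => intro d; simp [tallyD, binAux]
    | (k+1) =>
      intro d
      rw [tallyD]
      simp only [Nat.succ_ne_zero, dite_false]
      rw [ih ((k+1)/2) (Nat.div_lt_self (Nat.succ_pos k) (by omega)), binAux]
      simp [List.count_append]
      by_cases hp : (k+1) % 2 = 1 <;> simp [hp] <;> omega

theorem rel_init (n : Int) (h : 0 ≤ n) :
    PVRel (binStr n)
      ((if n = 0 then ((1:Int), (0:Int)) else (tallyD n.toNat 0, PySem.Int.mod n 2)).1,
       (if n = 0 then ((1:Int), (0:Int)) else (tallyD n.toNat 0, PySem.Int.mod n 2)).2, n) := by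
  by_cases h0 : n = 0
  · subst h0
    refine ⟨by simp [binStr], ?_, ?_, ?_, ?_⟩ <;> simp [binStr, toInt2]
  · have hpos : 0 < n := lt_of_le_of_ne h (Ne.symm h0)
    have htn : n.toNat ≠ 0 := by omega
    have hcast : ((n.toNat : Int)) = n := Int.toNat_of_nonneg h
    simp only [binStr, if_neg h0]
    refine ⟨binAux_ne_nil _ htn, binAux_chars _, ?_, ?_, ?_⟩ <;>
      simp [tallyD_count, binAux_getLast _ htn]
    · rw [← hcast]
      by_cases hp : n.toNat % 2 = 1 <;> simp [hp] <;> omega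
    · rw [toInt2_binAux, hcast]

-- three abstract steps compute exactly the table lookup
theorem stepD3_table (d last acc : Int) (h : last = 0 ∨ last = 1) :
    (stepD (stepD (stepD (d, last, acc)))).2.2 = 8 * acc + sufLookup d last := by
  by_cases h3 : 3 ≤ d
  · have hmax : max (-3) (min 3 d) = 3 := by omega
    have e0 : ¬ d = 0 := by omega
    have e0' : d > 0 := by omega
    have e1 : ¬ d + -1 = 0 := by omega
    have e1' : d + -1 > 0 := by omega
    have e2 : ¬ d + -1 + -1 = 0 := by omega
    have e2' : d + -1 + -1 > 0 := by omega
    have hs : sufLookup d last = 7 := by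
      rcases h with h | h <;> subst h <;> simp only [sufLookup, hmax] <;> decide
    rw [hs]
    rcases h with h | h <;> subst h <;>
      simp [stepD, e0, e0', e1, e1', e2, e2'] <;> ring
  · by_cases h3' : d ≤ -3
    · have hmax : max (-3) (min 3 d) = -3 := by omega
      have e0 : ¬ d = 0 := by omega
      have e0' : ¬ d > 0 := by omega
      have e1 : ¬ d + 1 = 0 := by omega
      have e1' : ¬ d + 1 > 0 := by omega
      have e2 : ¬ d + 1 + 1 = 0 := by omega
      have e2' : ¬ d + 1 + 1 > 0 := by omega
      have hs : sufLookup d last = 0 := by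
        rcases h with h | h <;> subst h <;> simp only [sufLookup, hmax] <;> decide
      rw [hs]
      rcases h with h | h <;> subst h <;>
        simp [stepD, e0, e0', e1, e1', e2, e2'] <;> ring
    · have hlo : -2 ≤ d := by omega
      have hhi : d ≤ 2 := by omega
      rcases h with h | h <;> subst h <;> interval_cases d <;>
        [skip; skip; skip; skip; skip; skip; skip; skip; skip; skip] <;>
        first
        | (rw [show sufLookup (-2) 0 = 0 from by decide]; norm_num [stepD]; try ring)
        | (rw [show sufLookup (-1) 0 = 1 from by decide]; norm_num [stepD]; try ring)
        | (rw [show sufLookup 0 0 = 3 from by decide]; norm_num [stepD]; try ring)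
        | (rw [show sufLookup 1 0 = 6 from by decide]; norm_num [stepD]; try ring)
        | (rw [show sufLookup 2 0 = 7 from by decide]; norm_num [stepD]; try ring)
        | (rw [show sufLookup (-2) 1 = 0 from by decide]; norm_num [stepD]; try ring)
        | (rw [show sufLookup (-1) 1 = 1 from by decide]; norm_num [stepD]; try ring)
        | (rw [show sufLookup 0 1 = 4 from by decide]; norm_num [stepD]; try ring)
        | (rw [show sufLookup 1 1 = 6 from by decide]; norm_num [stepD]; try ring)
        | (rw [show sufLookup 2 1 = 7 from by decide]; norm_num [stepD]; try ring)

-- ===== VERDICT =====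
theorem f_spec : Claim_equal_f := by
  intro n _ hpre
  unfold Spec_f
  have h1 := step_rel _ _ (rel_init n hpre)
  have h2 := step_rel _ _ h1
  have h3 := step_rel _ _ h2
  have hr : List.range 3 = [0, 1, 2] := rfl
  have hlast01 :
      (if n = 0 then ((1:Int), (0:Int)) else (tallyD n.toNat 0, PySem.Int.mod n 2)).2 = 0 ∨
      (if n = 0 then ((1:Int), (0:Int)) else (tallyD n.toNat 0, PySem.Int.mod n 2)).2 = 1 := by
    by_cases h0 : n = 0
    · simp [h0]
    · simp only [h0, if_false, PySem.Int.mod]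
      rw [Int.fmod_eq_emod_of_nonneg _ (by norm_num)]
      omega
  have htab := stepD3_table
    (if n = 0 then ((1:Int), (0:Int)) else (tallyD n.toNat 0, PySem.Int.mod n 2)).1
    (if n = 0 then ((1:Int), (0:Int)) else (tallyD n.toNat 0, PySem.Int.mod n 2)).2
    n hlast01
  have hval := h3.2.2.2.2
  simp only [f, f_alt, hr, List.foldl]
  rw [← hval, htab]
  by_cases h0 : n = 0 <;> simp [h0] <;> ring
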